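-- pv_equiv track=rewrite | github.com/pypy/pypy | pypy/translator/test/snippet.py | nested_whiles
-- ===== SOURCE A (Python) =====
-- def nested_whiles(i, j):
--     s = ''
--     z = 5
--     while z > 0:
--         z = z - 1
--         u = i
--         while u < j:
--             u = u + 1
--             s = s + '.'
--         s = s + '!'
--     return s
-- ===== SOURCE B (Python) =====
-- def nested_whiles(i, j):
--     return ('.' * max(0, j - i) + '!') * 5
-- ===== Notes on version B (the rewrite author's own statement) =====
-- stated objective: simpler
-- what changed: Replaced the nested while loops that append one character at a time by the closed-form string expression ('.'*max(0,j-i)+'!')*5.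
import Mathlib
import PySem

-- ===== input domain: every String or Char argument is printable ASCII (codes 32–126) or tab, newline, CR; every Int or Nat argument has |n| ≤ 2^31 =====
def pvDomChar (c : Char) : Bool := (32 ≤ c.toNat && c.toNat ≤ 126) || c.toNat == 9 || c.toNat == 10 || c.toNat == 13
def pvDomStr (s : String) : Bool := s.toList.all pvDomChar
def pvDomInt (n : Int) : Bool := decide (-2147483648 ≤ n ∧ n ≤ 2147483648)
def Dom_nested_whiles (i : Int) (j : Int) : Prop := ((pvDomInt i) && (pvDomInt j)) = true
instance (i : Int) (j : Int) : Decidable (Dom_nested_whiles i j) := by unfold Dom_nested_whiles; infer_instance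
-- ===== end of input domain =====

-- B replaces A's nested while loops by the closed-form string expression ('.'*max(0,j-i)+'!')*5 (simpler).

-- ===== PORT A =====
-- inner while loop: while u < j: u = u + 1; s = s + '.'
def nwInner (j : Int) (u : Int) (s : String) : String :=
  if u < j then nwInner j (u + 1) (s ++ ".") else s
termination_by (j - u).toNat
decreasing_by omega

-- outer while loop: z counts down from 5; each iteration runs the inner loop from u = i, then appends '!'
def nwOuter (i : Int) (j : Int) (z : Nat) (s : String) : String :=
  match z with
  | 0 => s
  | n + 1 => nwOuter i j n (nwInner j i s ++ "!")

def nested_whiles (i : Int) (j : Int) : String :=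
  nwOuter i j 5 ""

-- ===== PORT B =====
def nested_whiles_alt (i : Int) (j : Int) : String :=
  let block := String.ofList (List.replicate (max 0 (j - i)).toNat '.') ++ "!"
  String.join (List.replicate 5 block)

-- ===== PRECONDITION & SPEC =====
def Spec_nested_whiles (i : Int) (j : Int) (out : String) : Prop := out = nested_whiles_alt i j
instance (i : Int) (j : Int) (out : String) : Decidable (Spec_nested_whiles i j out) := by unfold Spec_nested_whiles; infer_instance

-- ===== CLAIM (what is proved, stated in full; the proofs are below) =====
def Claim_equal_nested_whiles : Prop := ∀ (i : Int) (j : Int), Dom_nested_whiles i j → Spec_nested_whiles i j (nested_whiles i j)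

-- ===== LEMMAS AND PROOFS =====

theorem nwInner_eq (j : Int) : ∀ (n : Nat) (u : Int), (j - u).toNat = n →
    ∀ s : String, nwInner j u s = s ++ String.ofList (List.replicate n '.') := by
  intro n
  induction n with
  | zero =>
    intro u hu s
    rw [nwInner]
    have : ¬ u < j := by omega
    rw [if_neg this]
    exact String.toList_inj.mp (by simp)
  | succ m ih =>
    intro u hu s
    rw [nwInner]
    have hlt : u < j := by omega
    rw [if_pos hlt, ih (u + 1) (by omega)]
    exact String.toList_inj.mp (by simp [List.replicate_succ])

theorem nested_whiles_eq (i j : Int) : nested_whiles i j = nested_whiles_alt i j := by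
  have hin : ∀ s, nwInner j i s = s ++ String.ofList (List.replicate (max 0 (j - i)).toNat '.') := by
    intro s
    apply nwInner_eq j _ i
    omega
  show nwOuter i j 5 "" = _
  simp only [nwOuter, hin]
  exact String.toList_inj.mp (by simp [nested_whiles_alt, String.join, List.replicate])

-- ===== VERDICT (by name: the statement is the Claim_ definition above) =====
theorem nested_whiles_spec : Claim_equal_nested_whiles := by
  intro i j _
  exact nested_whiles_eq i j
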